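-- pv_equiv track=rewrite | github.com/UninspiredCarrot/advent-of-code | 2023/day14.py | move_col
-- ===== SOURCE A (Python) =====
-- def move_col(column, reverse):
--     square_pos = [i for i in range(len(column)) if column[i] == '#']
--     square_pos.append(None)
--     new_column = []
--     start = 0
--     for pos in square_pos:
--         sub_column = column[start:pos]
--         zero_num = sub_column.count('O')
--         dot_num = sub_column.count('.')
--         if reverse:
--             new_column.extend(['.']*dot_num)
--             new_column.extend(['O']*zero_num)
--         else:
--             new_column.extend(['O']*zero_num)
--             new_column.extend(['.']*dot_num)
--         if pos != None:
--             new_column.append('#')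
--             start = pos+1
--     return new_column
-- ===== SOURCE B (Python) =====
-- def move_col(column, reverse):
--     # Split at '#' into segments, keeping only rocks 'O' and gaps '.';
--     # sort each segment ('O' > '.' in ASCII) and rejoin with '#'.
--     segments = []
--     current = []
--     for c in column:
--         if c == '#':
--             segments.append(current)
--             current = []
--         elif c in ('O', '.'):
--             current.append(c)
--     segments.append(current)
--     out = sorted(segments[0], reverse=not reverse)
--     for seg in segments[1:]:
--         out.append('#')
--         out.extend(sorted(seg, reverse=not reverse))
--     return out
-- ===== Notes on version B (the rewrite author's own statement) =====
-- stated objective: alternative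
-- what changed: Replaces A's '#'-index list + slicing + per-segment counting/replication with a single split-at-'#' pass that keeps only 'O'/'.' cells and sorts each segment (ASCII order puts 'O' before '.' when descending), rejoining segments with '#'.
import Mathlib
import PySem

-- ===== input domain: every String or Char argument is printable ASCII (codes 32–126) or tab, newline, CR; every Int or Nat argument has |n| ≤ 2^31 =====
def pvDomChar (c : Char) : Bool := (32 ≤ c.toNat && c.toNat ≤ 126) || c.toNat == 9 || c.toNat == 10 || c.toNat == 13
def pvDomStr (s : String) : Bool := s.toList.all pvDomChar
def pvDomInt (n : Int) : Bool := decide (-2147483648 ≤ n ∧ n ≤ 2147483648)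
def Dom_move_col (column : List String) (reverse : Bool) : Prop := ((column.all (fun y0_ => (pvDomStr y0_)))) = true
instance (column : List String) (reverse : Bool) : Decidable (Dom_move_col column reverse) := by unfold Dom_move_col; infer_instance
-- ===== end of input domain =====

-- B replaces A's '#'-index list + slice + count/replicate strategy by a split-at-'#' pass that
-- keeps only the rock/gap cells of each segment and sorts them (alternative decomposition, same result).

-- ===== PORT A =====
def move_col (column : List String) (reverse : Bool) : List String :=
  let square_pos : List (Option Int) :=
    ((PySem.List.pyRange 0 (column.length : Int) 1).filter
        (fun i => PySem.List.pyGet? column i == some "#")).map some ++ [none]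
  (square_pos.foldl
    (fun (st : List String × Int) pos =>
      let sub_column := PySem.List.slice column (some st.2) pos
      let zero_num := PySem.List.count sub_column "O"
      let dot_num := PySem.List.count sub_column "."
      let nc := if reverse then (st.1 ++ List.replicate dot_num ".") ++ List.replicate zero_num "O"
                else (st.1 ++ List.replicate zero_num "O") ++ List.replicate dot_num "."
      match pos with
      | some p => (nc ++ ["#"], p + 1)
      | none => (nc, st.2))
    ([], 0)).1

-- ===== PORT B =====
def move_col_alt (column : List String) (reverse : Bool) : List String :=
  let p := column.foldl
    (fun (st : List (List String) × List String) c =>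
      if c == "#" then (st.1 ++ [st.2], [])
      else if c == "O" || c == "." then (st.1, st.2 ++ [c])
      else st)
    ([], [])
  let segments := p.1 ++ [p.2]
  match segments with
  | [] => []  -- unreachable: segments always ends with p.2
  | s0 :: rest =>
      rest.foldl (fun out seg => (out ++ ["#"]) ++ PySem.List.sorted seg (fun x => x) (!reverse))
        (PySem.List.sorted s0 (fun x => x) (!reverse))

-- ===== PRECONDITION & SPEC =====
def Spec_move_col (column : List String) (reverse : Bool) (out : List String) : Prop := out = move_col_alt column reverse
instance (column : List String) (reverse : Bool) (out : List String) : Decidable (Spec_move_col column reverse out) := by unfold Spec_move_col; infer_instance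

-- ===== CLAIM (what is proved, stated in full; the proofs are below) =====
def Claim_equal_move_col : Prop := ∀ (column : List String) (reverse : Bool), Dom_move_col column reverse → Spec_move_col column reverse (move_col column reverse)

-- ===== LEMMAS AND PROOFS =====

/-- The run of 'O's and run of '.'s a segment contributes (A's per-segment output). -/
def emitA (reverse : Bool) (seg : List String) : List String :=
  if reverse then List.replicate (List.count "." seg) "." ++ List.replicate (List.count "O" seg) "O"
  else List.replicate (List.count "O" seg) "O" ++ List.replicate (List.count "." seg) "."

/-- A's loop body, named for the proofs (definitionally the lambda in `move_col`). -/
def aStep (column : List String) (reverse : Bool) (st : List String × Int) (pos : Option Int) :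
    List String × Int :=
  let sub_column := PySem.List.slice column (some st.2) pos
  let zero_num := PySem.List.count sub_column "O"
  let dot_num := PySem.List.count sub_column "."
  let nc := if reverse then (st.1 ++ List.replicate dot_num ".") ++ List.replicate zero_num "O"
            else (st.1 ++ List.replicate zero_num "O") ++ List.replicate dot_num "."
  match pos with
  | some p => (nc ++ ["#"], p + 1)
  | none => (nc, st.2)

/-- B's loop body, named for the proofs (definitionally the split lambda in `move_col_alt`). -/
def bStep (st : List (List String) × List String) (c : String) : List (List String) × List String :=
  if c == "#" then (st.1 ++ [st.2], [])
  else if c == "O" || c == "." then (st.1, st.2 ++ [c])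
  else st

/-- The (0-based) positions of '#' in the column. -/
def posN (col : List String) : List Nat :=
  (List.range col.length).filter (fun k => col[k]? == some "#")

def items (col : List String) : List (Option Int) :=
  (posN col).map (fun k => some ((k : Nat) : Int)) ++ [none]

/-- Segmentation of the column at '#' (unfiltered). -/
def segsU : List String → List (List String)
  | [] => [[]]
  | c :: t => if c = "#" then [] :: segsU t else (segsU t).modifyHead (c :: ·)

/-- The common normal form both programs compute. -/
def renderA (reverse : Bool) : List (List String) → List String
  | [] => []
  | s :: rest => emitA reverse s ++ rest.flatMap (fun g => "#" :: emitA reverse g)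

def isRock (c : String) : Bool := c == "O" || c == "."

lemma segsU_ne_nil (col : List String) : segsU col ≠ [] := by
  cases col with
  | nil => simp [segsU]
  | cons c t =>
    simp only [segsU]
    split_ifs
    · simp
    · cases h : segsU t with
      | nil => exact absurd h (segsU_ne_nil t)
      | cons a b => simp

lemma segsU_no_hash (col : List String) (h : "#" ∉ col) : segsU col = [col] := by
  induction col with
  | nil => rfl
  | cons c t ih =>
    have hc : ¬ c = "#" := fun e => h (by simp [e])
    have ht : "#" ∉ t := fun m => h (List.mem_cons_of_mem _ m)
    simp only [segsU, if_neg hc, ih ht, List.modifyHead]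

lemma posN_no_hash (col : List String) (h : "#" ∉ col) : posN col = [] := by
  unfold posN
  rw [List.filter_eq_nil_iff]
  intro k hk
  simp only [beq_iff_eq]
  exact fun hc => h (List.mem_of_getElem? hc)

lemma posN_cons (c : String) (t : List String) :
    posN (c :: t) = (if c = "#" then [0] else []) ++ (posN t).map (· + 1) := by
  unfold posN
  simp only [List.length_cons, List.range_succ_eq_map, List.filter_cons, List.filter_map,
    List.getElem?_cons_zero]
  have hcong : List.filter ((fun k => (c :: t)[k]? == some "#") ∘ Nat.succ) (List.range t.length)
      = List.filter (fun k => t[k]? == some "#") (List.range t.length) :=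
    List.filter_congr (fun k _ => by simp only [Function.comp_apply, List.getElem?_cons_succ])
  rw [hcong]
  by_cases hc : c = "#"
  · simp [hc]
  · simp [hc]

lemma posN_first_hash (pre suf : List String) (h : "#" ∉ pre) :
    posN (pre ++ "#" :: suf) = pre.length :: (posN suf).map (fun k => k + (pre.length + 1)) := by
  induction pre with
  | nil =>
    rw [List.nil_append, posN_cons]
    simp
  | cons c p ih =>
    have hc : ¬ c = "#" := fun e => h (by simp [e])
    have hp : "#" ∉ p := fun m => h (List.mem_cons_of_mem _ m)
    rw [List.cons_append, posN_cons, if_neg hc, ih hp]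
    simp only [List.nil_append, List.map_cons, List.map_map, List.length_cons]
    constructor

lemma segsU_first_hash (pre suf : List String) (h : "#" ∉ pre) :
    segsU (pre ++ "#" :: suf) = pre :: segsU suf := by
  induction pre with
  | nil => simp [segsU]
  | cons c p ih =>
    have hc : ¬ c = "#" := fun e => h (by simp [e])
    have hp : "#" ∉ p := fun m => h (List.mem_cons_of_mem _ m)
    rw [List.cons_append]
    simp only [segsU, if_neg hc, ih hp, List.modifyHead]

lemma move_col_eq (col : List String) (rev : Bool) :
    move_col col rev = ((items col).foldl (aStep col rev) ([], 0)).1 := by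
  have hlist :
      ((PySem.List.pyRange 0 (col.length : Int) 1).filter
        (fun i => PySem.List.pyGet? col i == some "#")).map some ++ [none] = items col := by
    rw [PySem.List.pyRange_one]
    simp only [sub_zero, Int.toNat_natCast, List.filter_map]
    unfold items posN
    rw [List.map_map]
    congr 1
    · rw [List.filter_congr (fun (k : Nat) _ => by
        simp only [Function.comp_apply]
        rw [show PySem.List.pyGet? col (0 + (k:Int)) = col[k]? by simp [pysem]] :
          ∀ k ∈ List.range col.length,
            ((fun i => PySem.List.pyGet? col i == some "#") ∘ fun k : Nat => 0 + (k:Int)) k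
              = (col[k]? == some "#"))]
      exact List.map_congr_left (fun k _ => by simp)
  show (List.foldl _ ([], 0) _).1 = _
  rw [hlist]
  rfl

lemma aStep_fst (col : List String) (rev : Bool) (acc : List String) (s : Int) (p : Option Int) :
    aStep col rev (acc, s) p
      = (acc ++ (aStep col rev ([], s) p).1, (aStep col rev ([], s) p).2) := by
  cases p <;> cases rev <;> simp [aStep, List.append_assoc]

lemma aStep_acc (col : List String) (rev : Bool) (ps : List (Option Int)) :
    ∀ (acc : List String) (s : Int),
      (ps.foldl (aStep col rev) (acc, s)).1 = acc ++ (ps.foldl (aStep col rev) ([], s)).1 := by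
  induction ps with
  | nil => intro acc s; simp
  | cons p t ih =>
    intro acc s
    simp only [List.foldl_cons]
    rw [aStep_fst]
    rcases h : aStep col rev ([], s) p with ⟨x, s'⟩
    rw [ih (acc ++ x) s', ih x s', List.append_assoc]

lemma slice_shift_some (pre suf : List String) (s k : Nat) :
    PySem.List.slice (pre ++ suf) (some ((s + pre.length : Nat) : Int)) (some ((k + pre.length : Nat) : Int))
      = PySem.List.slice suf (some (s : Int)) (some (k : Int)) := by
  rw [PySem.List.slice_natCast, PySem.List.slice_natCast, List.drop_append,
    List.drop_eq_nil_of_le (by omega)]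
  simp only [List.nil_append, Nat.add_sub_cancel]
  congr 1
  omega

lemma slice_shift_none (pre suf : List String) (s : Nat) :
    PySem.List.slice (pre ++ suf) (some ((s + pre.length : Nat) : Int)) none
      = PySem.List.slice suf (some (s : Int)) none := by
  rw [PySem.List.slice_from_natCast, PySem.List.slice_from_natCast, List.drop_append,
    List.drop_eq_nil_of_le (by omega)]
  simp

lemma aStep_shift (pre suf : List String) (rev : Bool) (ps : List Nat) :
    ∀ (acc : List String) (s : Nat),
      ((ps.map (fun k => some (((k + pre.length : Nat)) : Int)) ++ [none]).foldl
          (aStep (pre ++ suf) rev) (acc, ((s + pre.length : Nat) : Int))).1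
      = ((ps.map (fun k => some ((k : Nat) : Int)) ++ [none]).foldl
          (aStep suf rev) (acc, ((s : Nat) : Int))).1 := by
  induction ps with
  | nil =>
    intro acc s
    simp only [List.map_nil, List.nil_append, List.foldl_cons, List.foldl_nil]
    simp only [aStep]
    rw [slice_shift_none pre suf s]
  | cons k t ih =>
    intro acc s
    simp only [List.map_cons, List.cons_append, List.foldl_cons]
    have hstep : aStep (pre ++ suf) rev (acc, ((s + pre.length : Nat) : Int))
          (some ((k + pre.length : Nat) : Int))
        = ((aStep suf rev (acc, (s : Int)) (some (k : Int))).1, (((k+1) + pre.length : Nat) : Int)) := by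
      simp only [aStep]
      rw [slice_shift_some pre suf s k]
      refine Prod.ext rfl ?_
      show ((k + pre.length : Nat) : Int) + 1 = _
      push_cast
      ring
    rw [hstep]
    have h2 : aStep suf rev (acc, (s:Int)) (some (k:Int))
        = ((aStep suf rev (acc, (s:Int)) (some (k:Int))).1, (((k+1) : Nat) : Int)) := by
      refine Prod.ext rfl ?_
      show (k : Int) + 1 = _
      push_cast
      ring
    conv_rhs => rw [h2]
    exact ih _ (k+1)

lemma emitA_filter (rev : Bool) (seg : List String) :
    emitA rev (seg.filter isRock) = emitA rev seg := by
  have hO : List.count "O" (seg.filter isRock) = List.count "O" seg :=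
    List.count_filter (by simp [isRock])
  have hD : List.count "." (seg.filter isRock) = List.count "." seg :=
    List.count_filter (by simp [isRock])
  cases rev <;> simp [emitA, hO, hD]

lemma flatMap_hash (rev : Bool) (l : List (List String)) (h : l ≠ []) :
    l.flatMap (fun g => "#" :: emitA rev g) = "#" :: renderA rev l := by
  cases l with
  | nil => exact absurd rfl h
  | cons s r => simp [renderA]

lemma dot_lt_O : ("." : String) < "O" := by simp; decide

lemma ins_cons_O (ys : List String) :
    PySem.List.insertBy (fun u v : String => decide (v < u)) "O" ("O" :: ys)
    = "O" :: PySem.List.insertBy (fun u v : String => decide (v < u)) "O" ys := by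
  simp [PySem.List.insertBy]

lemma ins_cons_DO (ys : List String) :
    PySem.List.insertBy (fun u v : String => decide (v < u)) "O" ("." :: ys)
    = "O" :: "." :: ys := by
  simp only [PySem.List.insertBy]
  rw [if_pos (by simp; decide)]

lemma ins_cons_OD (ys : List String) :
    PySem.List.insertBy (fun u v : String => decide (v < u)) "." ("O" :: ys)
    = "O" :: PySem.List.insertBy (fun u v : String => decide (v < u)) "." ys := by
  simp only [PySem.List.insertBy]
  rw [if_neg (by simp; decide)]

lemma ins_cons_DD (ys : List String) :
    PySem.List.insertBy (fun u v : String => decide (v < u)) "." ("." :: ys)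
    = "." :: PySem.List.insertBy (fun u v : String => decide (v < u)) "." ys := by
  simp [PySem.List.insertBy]

lemma insO (a b : Nat) :
    PySem.List.insertBy (fun u v : String => decide (v < u)) "O"
      (List.replicate a "O" ++ List.replicate b ".")
    = List.replicate (a + 1) "O" ++ List.replicate b "." := by
  induction a with
  | zero =>
    simp only [List.replicate_zero, List.nil_append]
    cases b with
    | zero => rfl
    | succ b => rw [List.replicate_succ, ins_cons_DO]; simp [List.replicate_succ]
  | succ a iha =>
    rw [List.replicate_succ, List.cons_append, ins_cons_O, iha]
    simp [List.replicate_succ]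

lemma insD (a b : Nat) :
    PySem.List.insertBy (fun u v : String => decide (v < u)) "."
      (List.replicate a "O" ++ List.replicate b ".")
    = List.replicate a "O" ++ List.replicate (b + 1) "." := by
  induction a with
  | zero =>
    simp only [List.replicate_zero, List.nil_append]
    induction b with
    | zero => rfl
    | succ b ihb =>
      rw [List.replicate_succ, ins_cons_DD, ihb]
      simp [List.replicate_succ]
  | succ a iha =>
    rw [List.replicate_succ, List.cons_append, ins_cons_OD, iha]
    simp

lemma foldIns (xs : List String) : ∀ (a b : Nat), (∀ x ∈ xs, x = "O" ∨ x = ".") →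
    xs.foldl (fun acc x => PySem.List.insertBy (fun u v : String => decide (v < u)) x acc)
      (List.replicate a "O" ++ List.replicate b ".")
    = List.replicate (a + List.count "O" xs) "O" ++ List.replicate (b + List.count "." xs) "." := by
  induction xs with
  | nil => intro a b _; simp
  | cons x r ih =>
    intro a b h
    rcases h x (List.mem_cons_self) with hx | hx <;> subst hx
    · rw [List.foldl_cons, insO, ih (a+1) b (fun y hy => h y (List.mem_cons_of_mem _ hy))]
      rw [List.count_cons_self, List.count_cons_of_ne (by decide)]
      rw [Nat.add_comm (List.count "O" r) 1, ← Nat.add_assoc]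
    · rw [List.foldl_cons, insD, ih a (b+1) (fun y hy => h y (List.mem_cons_of_mem _ hy))]
      rw [List.count_cons_self, List.count_cons_of_ne (by decide)]
      rw [Nat.add_comm (List.count "." r) 1, ← Nat.add_assoc]

lemma sorted_rock (xs : List String) (h : ∀ x ∈ xs, x = "O" ∨ x = ".") (rev : Bool) :
    PySem.List.sorted xs (fun x => x) (!rev) = emitA rev xs := by
  cases rev with
  | true =>
    show PySem.List.sorted xs (fun x => x) false = _
    rw [PySem.List.sorted_id_eq_of_perm_of_pairwise xs
      (List.replicate (List.count "." xs) "." ++ List.replicate (List.count "O" xs) "O")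
      (List.perm_iff_count.mpr ?_) ?_]
    · simp [emitA]
    · intro v
      by_cases hO : v = "O"
      · subst hO; simp [List.count_replicate]
      · by_cases hD : v = "."
        · subst hD; simp [List.count_replicate]
        · have hxs : List.count v xs = 0 :=
            List.count_eq_zero.mpr (fun hm => by rcases h v hm with e | e; exacts [hO e, hD e])
          rw [hxs]
          simp [List.count_append, List.count_replicate, beq_iff_eq]
          constructor <;> (intro e; exact absurd e.symm (by assumption))
    · apply List.pairwise_append.mpr
      refine ⟨List.pairwise_replicate.mpr (Or.inr le_rfl),
              List.pairwise_replicate.mpr (Or.inr le_rfl), ?_⟩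
      intro x hx y hy
      rw [List.eq_of_mem_replicate hx, List.eq_of_mem_replicate hy]
      exact le_of_lt dot_lt_O
  | false =>
    show PySem.List.sorted xs (fun x => x) true = _
    rw [PySem.List.sorted_rev_eq_foldl_insertBy]
    have h0 := foldIns xs 0 0 h
    simp only [List.replicate_zero, List.nil_append, Nat.zero_add] at h0
    rw [h0]
    simp [emitA]

lemma bsplit (t : List String) :
    ∀ (segs : List (List String)) (cur : List String),
      (t.foldl bStep (segs, cur)).1 ++ [(t.foldl bStep (segs, cur)).2]
      = segs ++ ((segsU t).map (fun s => s.filter isRock)).modifyHead (cur ++ ·) := by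
  induction t with
  | nil => intro segs cur; simp [segsU]
  | cons c r ih =>
    intro segs cur
    by_cases hc : c = "#"
    · subst hc
      rw [List.foldl_cons, show bStep (segs, cur) "#" = (segs ++ [cur], []) from by simp [bStep],
        ih]
      simp only [segsU, reduceIte]
      obtain ⟨a, b, h⟩ : ∃ a b, (segsU r).map (fun s => s.filter isRock) = a :: b := by
        cases hs : segsU r with
        | nil => exact absurd hs (segsU_ne_nil r)
        | cons x y => exact ⟨x.filter isRock, y.map (fun s => s.filter isRock), by simp⟩
      rw [h]
      simp
      exact h.symm
    · by_cases hr : c = "O" ∨ c = "."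
      · have hstep : bStep (segs, cur) c = (segs, cur ++ [c]) := by
          rcases hr with h | h <;> subst h <;> simp [bStep]
        rw [List.foldl_cons, hstep, ih]
        simp only [segsU, if_neg hc]
        cases h : segsU r with
        | nil => exact absurd h (segsU_ne_nil r)
        | cons a b =>
          simp only [List.modifyHead_cons, List.map_cons, List.filter_cons]
          rw [show (isRock c = true) from by rcases hr with h | h <;> simp [isRock, h]]
          simp
      · have hstep : bStep (segs, cur) c = (segs, cur) := by
          have h1 : ¬ c = "O" := fun e => hr (Or.inl e)
          have h2 : ¬ c = "." := fun e => hr (Or.inr e)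
          simp [bStep, hc, h1, h2]
        rw [List.foldl_cons, hstep, ih]
        simp only [segsU, if_neg hc]
        cases h : segsU r with
        | nil => exact absurd h (segsU_ne_nil r)
        | cons a b =>
          simp only [List.modifyHead_cons, List.map_cons, List.filter_cons]
          rw [show (isRock c = false) from by
            have h1 : ¬ c = "O" := fun e => hr (Or.inl e)
            have h2 : ¬ c = "." := fun e => hr (Or.inr e)
            simp [isRock, h1, h2]]
          simp

lemma first_hash (col : List String) (hh : "#" ∈ col) :
    ∃ pre suf, col = pre ++ "#" :: suf ∧ "#" ∉ pre := by
  induction col with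
  | nil => simp at hh
  | cons c t ih =>
    by_cases hc : c = "#"
    · exact ⟨[], t, by simp [hc], by simp⟩
    · have ht : "#" ∈ t := by
        rcases List.mem_cons.mp hh with e | e
        · exact absurd e.symm hc
        · exact e
      obtain ⟨p, s, hc2, hp⟩ := ih ht
      refine ⟨c :: p, s, by simp [hc2], ?_⟩
      intro hm
      rcases List.mem_cons.mp hm with e | e
      · exact hc e.symm
      · exact hp e

theorem mainA : ∀ (n : Nat) (col : List String), col.length ≤ n → ∀ (rev : Bool),
    move_col col rev = renderA rev (segsU col) := by
  intro n
  induction n with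
  | zero =>
    intro col hlen rev
    have hnil : col = [] := List.eq_nil_of_length_eq_zero (Nat.le_zero.mp hlen)
    subst hnil
    cases rev <;> rfl
  | succ n ih =>
    intro col hlen rev
    by_cases hh : "#" ∈ col
    · -- split at the first '#'
      obtain ⟨pre, suf, hcol, hpreh⟩ := first_hash col hh
      have hsuf : suf.length ≤ n := by
        have : col.length = pre.length + suf.length + 1 := by simp [hcol]; omega
        omega
      rw [hcol]
      rw [move_col_eq]
      unfold items
      rw [posN_first_hash pre suf hpreh]
      simp only [List.map_cons, List.map_map, List.cons_append, List.foldl_cons]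
      have hstep1 : aStep (pre ++ "#" :: suf) rev ([], 0) (some ((pre.length : Nat) : Int))
          = (emitA rev pre ++ ["#"], ((0 + (pre ++ ["#"]).length : Nat) : Int)) := by
        simp only [aStep]
        rw [PySem.List.slice_zero_start, PySem.List.slice_to_natCast, List.take_left]
        refine Prod.ext ?_ ?_
        · cases rev <;> simp [emitA, PySem.List.count_eq]
        · show (pre.length : Int) + 1 = _
          push_cast
          simp
      rw [hstep1]
      have hfun : ((fun k => some ((k : Nat) : Int)) ∘ fun k => k + (pre.length + 1))
          = fun k : Nat => some ((k + (pre ++ ["#"]).length : Nat) : Int) := by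
        funext k
        simp
      rw [hfun]
      have hcol2 : pre ++ "#" :: suf = (pre ++ ["#"]) ++ suf := by simp
      rw [hcol2, aStep_shift (pre ++ ["#"]) suf rev (posN suf) (emitA rev pre ++ ["#"]) 0]
      rw [show ((0 : Nat) : Int) = (0 : Int) from rfl]
      rw [aStep_acc suf rev _ (emitA rev pre ++ ["#"]) 0]
      rw [← items, ← move_col_eq, ih suf hsuf rev]
      rw [← hcol2, segsU_first_hash pre suf hpreh]
      show emitA rev pre ++ ["#"] ++ renderA rev (segsU suf) = renderA rev (pre :: segsU suf)
      rw [show renderA rev (pre :: segsU suf)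
          = emitA rev pre ++ (segsU suf).flatMap (fun g => "#" :: emitA rev g) from rfl]
      rw [flatMap_hash rev _ (segsU_ne_nil suf), List.append_assoc]
      rfl
    · rw [move_col_eq]
      unfold items
      rw [posN_no_hash col hh]
      simp only [List.map_nil, List.nil_append, List.foldl_cons, List.foldl_nil]
      rw [segsU_no_hash col hh]
      simp only [aStep]
      rw [PySem.List.slice_zero_start, PySem.List.slice_none_none]
      cases rev <;> simp [renderA, emitA, PySem.List.count_eq]

theorem mainB (col : List String) (rev : Bool) :
    move_col_alt col rev = renderA rev (segsU col) := by
  have hsegs := bsplit col [] []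
  simp only [List.nil_append] at hsegs
  obtain ⟨u0, ur, hs⟩ : ∃ u0 ur, segsU col = u0 :: ur := by
    cases h : segsU col with
    | nil => exact absurd h (segsU_ne_nil col)
    | cons a b => exact ⟨a, b, rfl⟩
  rw [hs] at hsegs
  simp only [List.map_cons, List.modifyHead_cons] at hsegs
  show (match (col.foldl bStep ([], [])).1 ++ [(col.foldl bStep ([], [])).2] with
    | [] => []
    | s0 :: rest =>
        rest.foldl (fun out seg => (out ++ ["#"]) ++ PySem.List.sorted seg (fun x => x) (!rev))
          (PySem.List.sorted s0 (fun x => x) (!rev))) = _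
  rw [hsegs]
  simp only []
  rw [PySem.List.foldl_congr_mem _ _
    (fun out seg => out ++ ("#" :: PySem.List.sorted seg (fun x => x) (!rev))) _
    (fun acc x _ => by simp)]
  rw [PySem.List.foldl_append_eq_flatMap]
  rw [List.flatMap_map]
  have hseg : ∀ u : List String,
      PySem.List.sorted (u.filter isRock) (fun x => x) (!rev) = emitA rev u := by
    intro u
    rw [sorted_rock _ (fun x hx => by
      have := List.of_mem_filter hx
      revert this
      simp [isRock]) rev]
    exact emitA_filter rev u
  rw [hseg u0]
  have hflat : ur.flatMap (fun x => "#" :: PySem.List.sorted (x.filter isRock) (fun x => x) (!rev))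
      = ur.flatMap (fun g => "#" :: emitA rev g) :=
    List.flatMap_congr (fun x _ => by rw [hseg x])
  rw [hflat, hs]
  rfl

-- ===== VERDICT (by name: the statement is the Claim_ definition above) =====
theorem move_col_spec : Claim_equal_move_col := by
  intro col rev _
  show move_col col rev = move_col_alt col rev
  rw [mainA col.length col (Nat.le_refl _) rev, mainB]
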